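-- pv_equiv track=rewrite | github.com/davidlowryduda/AoC18 | python/day5.py | array_collapse_maximally
-- ===== SOURCE A (Python) =====
-- def are_same(let1, let2):
--     return ord(let1) - ord(let2) == 32 or ord(let2) - ord(let1) == 32
--
-- def array_collapse_maximally(line):
--     """
--     In better_collapse_maximally, lots of strings are being recopied all
--     over the place. If we use an array, we can avoid this. But we must
--     initialize and translate from the array. Let's do a speed test.
--     """
--     arr = [l for l in line] # loses time
--     out = []
--     for l in arr:
--         if out and are_same(out[-1], l):
--             out.pop()       # presumably saves time
--         else:
--             out.append(l)   # also saves time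
--     return ''.join(out)     # loses time
-- ===== SOURCE B (Python) =====
-- def array_collapse_maximally(line):
--     # In-place index walk with backtracking instead of a stack:
--     # delete a matching adjacent pair where found and step back one
--     # position, since the join may have created a new pair.
--     arr = list(line)
--     i = 0
--     while i + 1 < len(arr):
--         if abs(ord(arr[i]) - ord(arr[i + 1])) == 32:
--             del arr[i:i + 2]
--             if i > 0:
--                 i -= 1
--         else:
--             i += 1
--     return ''.join(arr)
-- ===== Notes on version B (the rewrite author's own statement) =====
-- stated objective: alternative
-- what changed: Replaces the append/pop stack fold with a single in-place index walk over the character array that deletes matching adjacent pairs and backtracks one position after each deletion.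
import Mathlib
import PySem

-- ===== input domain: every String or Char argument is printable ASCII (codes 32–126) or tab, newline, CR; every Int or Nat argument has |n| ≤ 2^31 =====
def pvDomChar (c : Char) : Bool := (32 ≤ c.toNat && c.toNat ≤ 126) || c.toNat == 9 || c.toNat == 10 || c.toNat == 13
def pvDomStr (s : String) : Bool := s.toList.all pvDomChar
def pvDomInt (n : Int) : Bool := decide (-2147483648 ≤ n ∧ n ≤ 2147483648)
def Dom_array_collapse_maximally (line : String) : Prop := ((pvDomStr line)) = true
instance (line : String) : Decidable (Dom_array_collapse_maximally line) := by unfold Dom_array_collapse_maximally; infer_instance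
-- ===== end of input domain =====

-- B replaces A's append/pop stack fold with a single in-place index walk that
-- deletes matching adjacent pairs and backtracks one position after a deletion
-- (objective: alternative algorithm, same results).

-- ===== PORT A =====
-- helper are_same: |ord x - ord y| == 32, written as the two subtractions
def areSame (let1 let2 : Char) : Bool :=
  ((let1.toNat : Int) - (let2.toNat : Int) == 32) || ((let2.toNat : Int) - (let1.toNat : Int) == 32)

-- loop body of A: if out and are_same(out[-1], l): out.pop() else out.append(l)
def aStep (out : List Char) (l : Char) : List Char :=
  if h : out ≠ [] then
    if areSame (out.getLast h) l then out.dropLast else out ++ [l]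
  else out ++ [l]

def array_collapse_maximally (line : String) : String :=
  String.mk ((line.toList).foldl aStep [])

-- ===== PORT B =====
-- while i+1 < len(arr): delete matching pair at i (then i = max(i-1,0)) else i += 1
def bLoop (arr : List Char) (i : Nat) : List Char :=
  if h : i + 1 < arr.length then
    if areSame (arr[i]'(by omega)) (arr[i+1]'h) then
      bLoop (arr.take i ++ arr.drop (i + 2)) (i - 1)
    else
      bLoop arr (i + 1)
  else arr
termination_by (arr.length - i) + arr.length
decreasing_by
  · simp; omega
  · omega

def array_collapse_maximally_alt (line : String) : String :=
  String.mk (bLoop line.toList 0)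

-- ===== PRECONDITION & SPEC =====
def Spec_array_collapse_maximally (line : String) (out : String) : Prop := out = array_collapse_maximally_alt line
instance (line : String) (out : String) : Decidable (Spec_array_collapse_maximally line out) := by unfold Spec_array_collapse_maximally; infer_instance

-- ===== CLAIM (what is proved, stated in full; the proofs are below) =====
def Claim_equal_array_collapse_maximally : Prop := ∀ (line : String), Dom_array_collapse_maximally line → Spec_array_collapse_maximally line (array_collapse_maximally line)

-- ===== LEMMAS AND PROOFS =====

-- "no adjacent matching pair" invariant of B's scanned prefix (= A's stack)
def NoRedex (p : List Char) : Prop := List.IsChain (fun a b => areSame a b = false) p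

lemma noRedex_dropLast {p : List Char} (h : NoRedex p) : NoRedex p.dropLast :=
  List.IsChain.dropLast h

lemma noRedex_append {p : List Char} (hp : p ≠ []) (h : NoRedex p) (l : Char)
    (hl : areSame (p.getLast hp) l = false) : NoRedex (p ++ [l]) := by
  unfold NoRedex at *
  refine List.isChain_append.mpr ⟨h, List.isChain_singleton l, ?_⟩
  intro x hx y hy
  rw [List.getLast?_eq_some_getLast hp] at hx
  simp at hx hy
  subst hx; subst hy; exact hl

-- key invariant: B's loop with irreducible prefix p equals A's fold with stack p
lemma key (q : List Char) : ∀ p : List Char, NoRedex p →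
    bLoop (p ++ q) (p.length - 1) = List.foldl aStep p q := by
  induction q with
  | nil =>
    intro p _
    rw [bLoop]
    have h0 : ¬ (p.length - 1 + 1 < (p ++ ([] : List Char)).length) := by
      simp; omega
    rw [dif_neg h0]
    simp
  | cons l q' ih =>
    intro p hp
    by_cases hpe : p = []
    · subst hpe
      have h1 : bLoop (([] : List Char) ++ l :: q') (([] : List Char).length - 1) = bLoop ([l] ++ q') ([l].length - 1) := by
        norm_num
      rw [h1, ih [l] (List.isChain_singleton l)]
      simp [aStep]
    · have hlen : p.length - 1 + 1 = p.length := by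
        have := List.length_pos_iff.mpr hpe; omega
      rw [bLoop]
      have hcond : p.length - 1 + 1 < (p ++ l :: q').length := by
        simp [hlen]
      rw [dif_pos hcond]
      have hg1 : (p ++ l :: q')[p.length - 1]'(by omega) = p.getLast hpe := by
        rw [List.getElem_append_left (by omega)]
        exact (List.getLast_eq_getElem hpe).symm
      have hg2 : (p ++ l :: q')[p.length - 1 + 1]'hcond = l := by
        simp only [hlen]
        rw [List.getElem_append_right (le_refl p.length)]
        simp
      simp only [hg1, hg2]
      by_cases hs : areSame (p.getLast hpe) l = true
      · rw [if_pos hs]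
        have htake : (p ++ l :: q').take (p.length - 1) = p.dropLast := by
          rw [List.take_append_of_le_length (by omega), List.dropLast_eq_take]
        have hdrop : (p ++ l :: q').drop (p.length - 1 + 2) = q' := by
          have he : p.length - 1 + 2 = p.length + 1 := by omega
          rw [he, ← List.singleton_append, ← List.append_assoc]
          have hl1 : (p ++ [l]).length = p.length + 1 := by simp
          rw [← hl1, List.drop_left]
        rw [htake, hdrop]
        have hlen2 : p.length - 1 - 1 = p.dropLast.length - 1 := by simp
        rw [hlen2, ih p.dropLast (noRedex_dropLast hp)]
        have : aStep p l = p.dropLast := by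
          unfold aStep
          rw [dif_pos hpe, if_pos hs]
        rw [List.foldl_cons, this]
      · have hs' : areSame (p.getLast hpe) l = false := by
          revert hs; cases areSame (p.getLast hpe) l <;> simp
        rw [if_neg hs]
        have h2 : p ++ l :: q' = (p ++ [l]) ++ q' := by simp
        have h3 : p.length = (p ++ [l]).length - 1 := by simp
        simp only [hlen]
        rw [h2, h3, ih (p ++ [l]) (noRedex_append hpe hp l hs')]
        have : aStep p l = p ++ [l] := by
          unfold aStep
          rw [dif_pos hpe, if_neg hs]
        rw [List.foldl_cons, this]

-- ===== VERDICT (by name: the statement is the Claim_ definition above) =====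
theorem array_collapse_maximally_spec : Claim_equal_array_collapse_maximally := by
  intro line _
  unfold Spec_array_collapse_maximally array_collapse_maximally array_collapse_maximally_alt
  have := key line.toList [] List.isChain_nil
  simp at this
  rw [this]
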